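-- pv_equiv track=rewrite | github.com/jmckeeota/news_madlibs | news_madlibs.py | select_an_article
-- ===== SOURCE A (Python) =====
-- def select_an_article(query_results) -> dict:
--     """
--     Returns the first non-None article from a returned article query. Returns an empty dict if no article is found.
--
--     ARGS:
--     query_result: A returned result from query_articles()
--     """
--     selected_article = {}
--     for query_result in query_results:
--         if ('title' in query_result and
--             'content' in query_result and
--             query_result['title'] is not None and
--             query_result['content'] is not None and
--             query_result['title'] != "" and
--             query_result['content'] != ""):
--             selected_article['title'] = query_result['title']
--             selected_article['content'] = query_result['content']
--             continue
--         else: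
--             pass
--
--     return selected_article
-- ===== SOURCE B (Python) =====
-- def select_an_article(query_results) -> dict:
--     """Reverse scan with early exit: the last valid article wins, so find it from the end."""
--     for qr in reversed(list(query_results)):
--         title = qr.get('title')
--         content = qr.get('content')
--         if title and content:
--             return {'title': title, 'content': content}
--     return {}
-- ===== Notes on version B (the rewrite author's own statement) =====
-- stated objective: simpler
-- what changed: Replaces the forward scan that keeps overwriting an accumulator dict with a reverse scan that returns a fresh dict at the first valid article (the last-valid-wins rule made explicit), using truthiness of dict.get to collapse the five-clause validity test. Pre_ only rules out duplicate 'title'/'content' keys in the association-list encoding, which no Python dict can exhibit.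
import Mathlib
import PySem

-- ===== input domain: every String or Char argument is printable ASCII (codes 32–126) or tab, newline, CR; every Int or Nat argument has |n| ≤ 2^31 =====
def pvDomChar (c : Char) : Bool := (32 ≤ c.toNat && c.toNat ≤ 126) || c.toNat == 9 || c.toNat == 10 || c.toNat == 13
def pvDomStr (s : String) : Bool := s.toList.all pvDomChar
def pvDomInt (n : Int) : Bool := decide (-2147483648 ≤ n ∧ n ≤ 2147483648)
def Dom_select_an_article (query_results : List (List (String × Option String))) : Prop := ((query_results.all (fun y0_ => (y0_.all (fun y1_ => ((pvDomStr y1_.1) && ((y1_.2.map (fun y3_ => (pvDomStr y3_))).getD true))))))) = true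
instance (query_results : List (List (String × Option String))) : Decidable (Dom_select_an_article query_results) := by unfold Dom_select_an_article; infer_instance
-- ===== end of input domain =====

-- B changes the traversal (reverse scan, early exit at the first valid article) for simplicity;
-- same return value, no claims beyond the theorems below.

-- ===== PORT A =====
-- dict lookup on the association list (first match), as Python's query_result[k]
def pvLookupA (qr : List (String × Option String)) (k : String) : Option (Option String) :=
  (qr.find? (fun p => p.1 == k)).map (·.2)

-- one iteration of A's for-loop body (the five-clause condition, in A's order)
def pvStepA (sel : PySem.Dict String String) (qr : List (String × Option String)) :
    PySem.Dict String String :=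
  if qr.any (fun p => p.1 == "title") then
    if qr.any (fun p => p.1 == "content") then
      match pvLookupA qr "title", pvLookupA qr "content" with
      | some (some t), some (some c) =>
          if t != "" then
            if c != "" then (sel.insert "title" t).insert "content" c
            else sel
          else sel
      | _, _ => sel
    else sel
  else sel

def select_an_article (query_results : List (List (String × Option String))) : List (String × String) :=
  (query_results.foldl pvStepA PySem.Dict.empty).items

-- ===== PORT B =====
-- Python's qr.get(k): None when the key is absent
def pvGetB (qr : List (String × Option String)) (k : String) : Option String :=
  ((qr.find? (fun p => p.1 == k)).map (·.2)).getD none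

-- truthiness of an Optional[str]
def pvTruthy (o : Option String) : Bool :=
  match o with
  | some s => s != ""
  | none => false

def pvValidB (qr : List (String × Option String)) : Bool :=
  pvTruthy (pvGetB qr "title") && pvTruthy (pvGetB qr "content")

def select_an_article_alt (query_results : List (List (String × Option String))) : List (String × String) :=
  match query_results.reverse.find? pvValidB with
  | some qr => [("title", (pvGetB qr "title").getD ""), ("content", (pvGetB qr "content").getD "")]
  | none => []

-- ===== PRECONDITION & SPEC =====
-- Pre_ excludes only association lists in which the key "title" or "content" occurs more than
-- once: such a list represents no Python dict (dict keys are unique), so no Python input is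
-- excluded; every list that encodes an actual query_articles() result dict satisfies Pre_.
def Pre_select_an_article (query_results : List (List (String × Option String))) : Prop :=
  (query_results.all (fun qr =>
    ((qr.map (·.1)).count "title" ≤ 1 : Bool) && ((qr.map (·.1)).count "content" ≤ 1 : Bool))) = true
instance (query_results : List (List (String × Option String))) : Decidable (Pre_select_an_article query_results) := by unfold Pre_select_an_article; infer_instance
def pvWitness_select_an_article : (List (List (String × Option String))) :=
  [[("title", some "t"), ("content", some "c")], [("title", some ""), ("content", none)]]

def Spec_select_an_article (query_results : List (List (String × Option String))) (out : List (String × String)) : Prop := out = select_an_article_alt query_results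
instance (query_results : List (List (String × Option String))) (out : List (String × String)) : Decidable (Spec_select_an_article query_results out) := by unfold Spec_select_an_article; infer_instance

-- ===== CLAIM (what is proved, stated in full; the proofs are below) =====
def Claim_equal_select_an_article : Prop := ∀ (query_results : List (List (String × Option String))), Dom_select_an_article query_results → Pre_select_an_article query_results → Spec_select_an_article query_results (select_an_article query_results)

-- ===== LEMMAS AND PROOFS =====

-- the dict B builds from a valid article
def pvMkB (qr : List (String × Option String)) : PySem.Dict String String :=
  PySem.Dict.mk [("title", (pvGetB qr "title").getD ""), ("content", (pvGetB qr "content").getD "")]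

-- invariant on A's accumulator: empty, or exactly a {title, content} dict
def pvInv (d : PySem.Dict String String) : Prop :=
  d = PySem.Dict.empty ∨ ∃ t c, d = PySem.Dict.mk [("title", t), ("content", c)]

theorem pvAny_eq_isSome_find? {α : Type} (p : α → Bool) (l : List α) :
    l.any p = (l.find? p).isSome := by
  induction l with
  | nil => rfl
  | cons x xs ih =>
    by_cases h : p x <;> simp [List.any_cons, h, ih]

theorem pvInsert_eq {d : PySem.Dict String String} (h : pvInv d) (t c : String) :
    (d.insert "title" t).insert "content" c = PySem.Dict.mk [("title", t), ("content", c)] := by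
  rcases h with h | ⟨t', c', h⟩ <;> subst h <;> rfl

theorem pvStepA_eq {d : PySem.Dict String String} (h : pvInv d)
    (qr : List (String × Option String)) :
    pvStepA d qr = if pvValidB qr then pvMkB qr else d := by
  unfold pvStepA pvValidB pvMkB pvTruthy pvGetB pvLookupA
  rw [pvAny_eq_isSome_find?, pvAny_eq_isSome_find?]
  cases hf : qr.find? (fun p => p.1 == "title") with
  | none => simp
  | some pt =>
    cases hg : qr.find? (fun p => p.1 == "content") with
    | none => simp
    | some pc =>
      cases ht : pt.2 with
      | none => simp [ht]
      | some t =>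
        cases hc : pc.2 with
        | none => simp [ht, hc]
        | some c =>
          by_cases h1 : t = "" <;> by_cases h2 : c = "" <;>
            simp [ht, hc, h1, h2, pvInsert_eq h]

theorem pvInv_stepA {d : PySem.Dict String String} (h : pvInv d)
    (qr : List (String × Option String)) : pvInv (pvStepA d qr) := by
  rw [pvStepA_eq h]
  split
  · exact Or.inr ⟨_, _, rfl⟩
  · exact h

theorem pvFoldl_eq (qrs : List (List (String × Option String)))
    (d : PySem.Dict String String) (h : pvInv d) :
    qrs.foldl pvStepA d =
      match qrs.reverse.find? pvValidB with
      | some qr => pvMkB qr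
      | none => d := by
  induction qrs generalizing d with
  | nil => rfl
  | cons x xs ih =>
    rw [List.foldl_cons, ih _ (pvInv_stepA h x)]
    rw [List.reverse_cons, List.find?_append]
    cases hxs : xs.reverse.find? pvValidB with
    | some qr => rfl
    | none =>
      simp only [Option.none_or, List.find?_singleton]
      rw [pvStepA_eq h]
      by_cases hv : pvValidB x <;> simp [hv]

-- ===== VERDICT (by name: the statement is the Claim_ definition above) =====
theorem select_an_article_spec : Claim_equal_select_an_article := by
  intro qrs _ _
  show select_an_article qrs = select_an_article_alt qrs
  unfold select_an_article select_an_article_alt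
  rw [pvFoldl_eq qrs PySem.Dict.empty (Or.inl rfl)]
  cases h : qrs.reverse.find? pvValidB <;> simp [pvMkB, PySem.Dict.empty]
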